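-- pv_equiv track=rewrite | github.com/ShepherdCode/ShepherdML | Localization/KmerCounter.py | next_kmer
-- ===== SOURCE A (Python) =====
-- def next_kmer(token)->str:
--     '''
--     Designed to be called in a feed-forward loop.
--     Example: next_kmer('AAAA') returns 'AAAC'.
--     Example: next_kmer('ATTT') returns 'CAAA'.
--     Example: next_kmer('TTTT') returns None.
--     '''
--     p = len(token)-1
--     next_token = list(token)
--     while p>=0:
--         if token[p]=='A':
--             next_token[p]='C'
--             word=''.join(next_token)
--             return word
--         if token[p]=='C':
--             next_token[p]='G'
--             word=''.join(next_token)
--             return word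
--         if token[p]=='G':
--             next_token[p]='T'
--             word=''.join(next_token)
--             return word
--         if token[p]=='T':
--             next_token[p]='A'
--             p = p-1
--     return None
-- ===== SOURCE B (Python) =====
-- def next_kmer(token)->str:
--     # Arithmetic reimplementation: decode the k-mer as a big-endian base-4
--     # number (A=0,C=1,G=2,T=3), add 1, and re-encode at the same width;
--     # overflow (all-T, including the empty string) yields None.
--     n = 0
--     for ch in token:
--         n = n * 4 + "ACGT".index(ch)
--     n += 1
--     if n >= 4 ** len(token):
--         return None
--     out = []
--     for _ in range(len(token)):
--         out.append("ACGT"[n % 4])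
--         n //= 4
--     return ''.join(reversed(out))
-- ===== Notes on version B (the rewrite author's own statement) =====
-- stated objective: alternative
-- what changed: replaces the right-to-left carry scan over the character list by decoding the k-mer into one base-4 integer, adding 1, and re-encoding it back to a fixed-width string
-- outside the precondition, e.g. on next_kmer(',C'): A returns ',G', B raises ValueError; on next_kmer('xT'): A does not finish within the time limit, B raises ValueError
import Mathlib
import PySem

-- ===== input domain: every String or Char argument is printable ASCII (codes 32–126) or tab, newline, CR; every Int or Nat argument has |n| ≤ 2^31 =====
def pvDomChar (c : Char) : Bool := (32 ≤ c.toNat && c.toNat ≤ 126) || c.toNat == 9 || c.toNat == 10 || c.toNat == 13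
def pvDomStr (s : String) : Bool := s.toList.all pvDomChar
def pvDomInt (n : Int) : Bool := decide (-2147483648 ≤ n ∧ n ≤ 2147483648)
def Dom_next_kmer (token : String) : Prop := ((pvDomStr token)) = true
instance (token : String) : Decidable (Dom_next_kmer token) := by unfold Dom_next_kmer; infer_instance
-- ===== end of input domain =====

-- B replaces A's right-to-left carry scan by base-4 decode / add 1 / fixed-width re-encode (alternative algorithm, same cost).

-- ===== PORT A =====
-- the while-loop of A, recursing on p (Python's p is Lean's p-1; p = 0 means p < 0, return None).
-- The index is always in range at every call, so getD's default is never used.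
def nkLoopA (tl : List Char) (nt : List Char) : Nat → Option String
  | 0 => none
  | p + 1 =>
    let c := tl.getD p '?'
    if c = 'A' then some (String.mk (nt.set p 'C'))
    else if c = 'C' then some (String.mk (nt.set p 'G'))
    else if c = 'G' then some (String.mk (nt.set p 'T'))
    else if c = 'T' then nkLoopA tl (nt.set p 'A') p
    else none  -- Python A loops FOREVER on a non-ACGT char; excluded by Pre_next_kmer

def next_kmer (token : String) : Option String :=
  nkLoopA token.toList token.toList token.toList.length

-- ===== PORT B =====
-- "ACGT".index(ch); Python raises ValueError on any other char (excluded by Pre_next_kmer)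
def nkDigit (c : Char) : Nat :=
  if c = 'A' then 0 else if c = 'C' then 1 else if c = 'G' then 2 else if c = 'T' then 3 else 0

def nkChr (d : Nat) : Char :=
  if d = 0 then 'A' else if d = 1 then 'C' else if d = 2 then 'G' else 'T'

-- the re-encoding loop of B: k iterations of out.append("ACGT"[n % 4]); n //= 4
def nkEncLoop : Nat → Nat → List Char → List Char
  | 0, _, out => out
  | k + 1, n, out => nkEncLoop k (n / 4) (out ++ [nkChr (n % 4)])

def next_kmer_alt (token : String) : Option String :=
  let tl := token.toList
  let n := tl.foldl (fun a c => a * 4 + nkDigit c) 0 + 1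
  if 4 ^ tl.length ≤ n then none
  else some (String.mk (nkEncLoop tl.length n []).reverse)

-- ===== PRECONDITION & SPEC =====
-- Pre_ excludes tokens containing any non-ACGT character: there Python B raises ValueError,
-- while Python A either loops forever (the carry scan reaches the invalid char) or returns a
-- half-incremented word whose invalid part is untouched (e.g. ',C' -> ',G').
def Pre_next_kmer (token : String) : Prop :=
  (token.toList.all fun c => c == 'A' || c == 'C' || c == 'G' || c == 'T') = true
instance (token : String) : Decidable (Pre_next_kmer token) := by unfold Pre_next_kmer; infer_instance

def pvWitness_next_kmer : String := "ATGC"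

def Spec_next_kmer (token : String) (out : Option String) : Prop := out = next_kmer_alt token
instance (token : String) (out : Option String) : Decidable (Spec_next_kmer token out) := by unfold Spec_next_kmer; infer_instance

-- ===== CLAIM (what is proved, stated in full; the proofs are below) =====
def Claim_equal_next_kmer : Prop := ∀ (token : String), Dom_next_kmer token → Pre_next_kmer token → Spec_next_kmer token (next_kmer token)

-- ===== LEMMAS AND PROOFS =====

-- value of a REVERSED (little-endian) digit list
def nkValR : List Char → Nat
  | [] => 0
  | c :: r => nkDigit c + 4 * nkValR r

-- increment on a REVERSED char list (reference form of A's carry scan)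
def nkIncR : List Char → Option (List Char)
  | [] => none
  | c :: r => if c = 'T' then (nkIncR r).map (fun t => 'A' :: t) else some (nkChr (nkDigit c + 1) :: r)

-- little-endian encoder (reference form of B's loop)
def nkEncR : Nat → Nat → List Char
  | 0, _ => []
  | k + 1, n => nkChr (n % 4) :: nkEncR k (n / 4)

def nkGood (c : Char) : Prop := c = 'A' ∨ c = 'C' ∨ c = 'G' ∨ c = 'T'

theorem nkLoopA_spec (p : Nat) : ∀ (tl nt : List Char), p ≤ tl.length → p ≤ nt.length →
    tl.take p = nt.take p → (∀ c ∈ tl.take p, nkGood c) →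
    nkLoopA tl nt p = (nkIncR (tl.take p).reverse).map (fun r => String.mk (r.reverse ++ nt.drop p)) := by
  induction p with
  | zero => intro tl nt _ _ _ _; simp [nkLoopA, nkIncR]
  | succ q ih =>
    intro tl nt hql hqn htake hgood
    have hq : q < tl.length := Nat.lt_of_succ_le hql
    have hqn' : q < nt.length := Nat.lt_of_succ_le hqn
    have hget : tl.getD q '?' = tl[q] := List.getD_eq_getElem tl '?' hq
    have htakeq : tl.take q = nt.take q := by
      have := congrArg (List.take q) htake
      simpa [List.take_take] using this
    have htake1 : tl.take (q+1) = tl.take q ++ [tl[q]] := List.take_succ_eq_append_getElem hq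
    have hmem : tl[q] ∈ tl.take (q+1) := by
      rw [htake1]; exact List.mem_append_right _ (by simp)
    have hgq : nkGood tl[q] := hgood _ hmem
    have hgpre : ∀ c ∈ tl.take q, nkGood c := by
      intro c hc
      exact hgood c (by rw [htake1]; exact List.mem_append_left _ hc)
    have hset : ∀ (a : Char), nt.set q a = nt.take q ++ a :: nt.drop (q+1) := by
      intro a; rw [List.set_eq_take_append_cons_drop, if_pos hqn']
    rcases hgq with h | h | h | h
    · rw [nkLoopA]
      simp only [hget, h]
      rw [htake1]
      simp [nkIncR, nkDigit, nkChr, htakeq, hset, h]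
    · rw [nkLoopA]
      simp only [hget, h]
      rw [htake1]
      simp [nkIncR, nkDigit, nkChr, htakeq, hset, h]
    · rw [nkLoopA]
      simp only [hget, h]
      rw [htake1]
      simp [nkIncR, nkDigit, nkChr, htakeq, hset, h]
    · -- carry case
      rw [nkLoopA]
      simp only [hget, h]
      have htakeq' : tl.take q = (nt.set q 'A').take q := by
        rw [htakeq, List.take_set, List.set_eq_of_length_le (by simp)]
      have ihres := ih tl (nt.set q 'A') (Nat.le_of_lt hq) (by simp; omega) htakeq' hgpre
      have hdrop : (nt.set q 'A').drop q = 'A' :: nt.drop (q+1) := by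
        rw [hset]
        have hlen : (nt.take q).length = q := by simp [Nat.le_of_lt hqn']
        rw [List.drop_append_of_le_length (by omega)]
        simp [hlen]
      rw [ihres, hdrop, htake1]
      simp only [List.reverse_append, List.reverse_cons, List.reverse_nil, List.nil_append,
        List.singleton_append, nkIncR, if_pos rfl]
      cases nkIncR (tl.take q).reverse <;> simp [h]

theorem nkValR_append (xs : List Char) (c : Char) :
    nkValR (xs ++ [c]) = nkValR xs + nkDigit c * 4 ^ xs.length := by
  induction xs with
  | nil => simp [nkValR]
  | cons a t ih => simp [nkValR, ih, pow_succ]; ring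

theorem nkFoldl_val (l : List Char) : ∀ (a : Nat),
    l.foldl (fun a c => a * 4 + nkDigit c) a = a * 4 ^ l.length + nkValR l.reverse := by
  induction l with
  | nil => intro a; simp [nkValR]
  | cons c t ih =>
    intro a
    simp only [List.foldl_cons, ih, List.reverse_cons, nkValR_append, List.length_cons,
      List.length_reverse]
    ring

theorem nkEncLoop_acc (k : Nat) : ∀ (n : Nat) (acc : List Char),
    nkEncLoop k n acc = acc ++ nkEncR k n := by
  induction k with
  | zero => intro n acc; simp [nkEncLoop, nkEncR]
  | succ q ih => intro n acc; simp [nkEncLoop, nkEncR, ih]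

theorem nkDigit_lt (c : Char) : nkDigit c < 4 := by
  unfold nkDigit; split_ifs <;> omega

theorem nkChr_digit (c : Char) (h : nkGood c) : nkChr (nkDigit c) = c := by
  rcases h with h | h | h | h <;> simp [h, nkDigit, nkChr]

theorem nkValR_lt (rl : List Char) : nkValR rl < 4 ^ rl.length := by
  induction rl with
  | nil => simp [nkValR]
  | cons c r ih =>
    have := nkDigit_lt c
    simp only [nkValR, List.length_cons, pow_succ]
    omega

theorem nkEncR_valR (rl : List Char) (h : ∀ c ∈ rl, nkGood c) :
    nkEncR rl.length (nkValR rl) = rl := by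
  induction rl with
  | nil => simp [nkEncR]
  | cons c r ih =>
    have hd := nkDigit_lt c
    have hmod : (nkDigit c + 4 * nkValR r) % 4 = nkDigit c := by omega
    have hdiv : (nkDigit c + 4 * nkValR r) / 4 = nkValR r := by omega
    simp only [List.length_cons, nkEncR, nkValR, hmod, hdiv]
    rw [nkChr_digit c (h c (by simp)), ih (fun x hx => h x (by simp [hx]))]

theorem nkIncR_arith (rl : List Char) (h : ∀ c ∈ rl, nkGood c) :
    nkIncR rl = if 4 ^ rl.length ≤ nkValR rl + 1 then none
                else some (nkEncR rl.length (nkValR rl + 1)) := by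
  induction rl with
  | nil => simp [nkIncR, nkValR]
  | cons c r ih =>
    have hv := nkValR_lt r
    have hgc := h c (by simp)
    have hgr : ∀ x ∈ r, nkGood x := fun x hx => h x (by simp [hx])
    by_cases hT : c = 'T'
    · have hd : nkDigit c = 3 := by simp [hT, nkDigit]
      have hval : nkValR (c :: r) + 1 = 4 * (nkValR r + 1) := by simp [nkValR, hd]; ring
      have hcond : (4 ^ (c :: r).length ≤ nkValR (c :: r) + 1) ↔ (4 ^ r.length ≤ nkValR r + 1) := by
        simp only [List.length_cons, pow_succ, hval]; omega
      rw [nkIncR, if_pos hT, ih hgr]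
      by_cases hc : 4 ^ r.length ≤ nkValR r + 1
      · rw [if_pos hc, if_pos (hcond.mpr hc)]; simp
      · have : ¬ (4 ^ (c :: r).length ≤ nkValR (c :: r) + 1) := fun hh => hc (hcond.mp hh)
        rw [if_neg hc, if_neg this]
        simp only [Option.map_some]
        congr 1
        have hmod : (nkValR (c :: r) + 1) % 4 = 0 := by omega
        have hdiv : (nkValR (c :: r) + 1) / 4 = nkValR r + 1 := by omega
        simp [nkEncR, hmod, hdiv, nkChr]
    · have hd : nkDigit c ≤ 2 := by
        rcases hgc with h1 | h1 | h1 | h1 <;> simp [h1, nkDigit] at hT ⊢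
      have hval : nkValR (c :: r) = nkDigit c + 4 * nkValR r := rfl
      have hcond : ¬ (4 ^ (c :: r).length ≤ nkValR (c :: r) + 1) := by
        simp only [List.length_cons, pow_succ, hval]; omega
      rw [nkIncR, if_neg hT, if_neg hcond]
      congr 1
      have hmod : (nkValR (c :: r) + 1) % 4 = nkDigit c + 1 := by omega
      have hdiv : (nkValR (c :: r) + 1) / 4 = nkValR r := by omega
      have henc : nkEncR r.length (nkValR r) = r := nkEncR_valR r hgr
      simp [nkEncR, hmod, hdiv, henc]

-- ===== VERDICT (by name: the statement is the Claim_ definition above) =====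
theorem next_kmer_spec : Claim_equal_next_kmer := by
  intro token _ hpre
  unfold Pre_next_kmer at hpre
  have hgood : ∀ c ∈ token.toList, nkGood c := by
    intro c hc
    have := List.all_eq_true.mp hpre c hc
    simp only [Bool.or_eq_true, beq_iff_eq] at this
    unfold nkGood; tauto
  unfold Spec_next_kmer next_kmer next_kmer_alt
  set tl := token.toList with htl
  have hA := nkLoopA_spec tl.length tl tl le_rfl le_rfl rfl (by rw [List.take_length]; exact hgood)
  rw [List.take_length] at hA
  rw [hA]
  have hgr : ∀ c ∈ tl.reverse, nkGood c := by
    intro c hc; exact hgood c (List.mem_reverse.mp hc)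
  have hinc := nkIncR_arith tl.reverse hgr
  rw [hinc]
  have hfold : tl.foldl (fun a c => a * 4 + nkDigit c) 0 = nkValR tl.reverse := by
    rw [nkFoldl_val]; ring
  simp only [hfold, List.length_reverse, nkEncLoop_acc, List.nil_append]
  by_cases hc : 4 ^ tl.length ≤ nkValR tl.reverse + 1
  · simp [hc]
  · simp [hc]
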